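-- pv_equiv track=rewrite | github.com/olimpiadi-informatica/scolastiche | src/fibonacci-secondarie/2024-terza-fase/contest/s-2-spegni-tutto/testcases.py | solve
-- ===== SOURCE A (Python) =====
-- def solve(A):
--     c = 0
--     for i in range(len(A)):
--         if A[i] == 1:
--             c += 1
--             if i+1<len(A) and A[i+1] == 1:
--                 A[i+1] = 0
--     return c
-- ===== SOURCE B (Python) =====
-- def solve(A):
--     c = 0
--     i = 0
--     n = len(A)
--     while i < n:
--         if A[i] == 1:
--             s = i
--             while i < n and A[i] == 1:
--                 i += 1
--             L = i - s
--             c += (L + 1) // 2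
--             for j in range(s + 1, i, 2):
--                 A[j] = 0
--         else:
--             i += 1
--     return c
-- ===== Notes on version B (the rewrite author's own statement) =====
-- stated objective: alternative
-- what changed: Replaces A's per-element scan with mutate-the-next-element skipping by explicit segmentation into maximal runs of 1s with a closed-form (L+1)//2 count per run (and the same in-place zeroing of odd offsets).
import Mathlib
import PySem

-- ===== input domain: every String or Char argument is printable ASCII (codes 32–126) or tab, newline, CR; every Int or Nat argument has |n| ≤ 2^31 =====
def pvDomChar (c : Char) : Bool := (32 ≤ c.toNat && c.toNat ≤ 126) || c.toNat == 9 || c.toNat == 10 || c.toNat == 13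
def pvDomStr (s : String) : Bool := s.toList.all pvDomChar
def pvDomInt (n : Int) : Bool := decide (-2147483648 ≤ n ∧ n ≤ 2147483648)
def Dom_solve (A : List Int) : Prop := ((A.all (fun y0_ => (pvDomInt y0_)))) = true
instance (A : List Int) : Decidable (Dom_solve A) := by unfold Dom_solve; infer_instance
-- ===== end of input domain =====

-- B replaces A's "zero the next element to skip it" scan by maximal-run segmentation with a
-- closed-form (L+1)//2 count per run (objective: alternative). Both Pythons mutate A in place
-- to the same final state; the equivalence proved here is about the RETURN value only.

-- ===== PORT A =====
-- A's loop reads A[i] and only ever writes A[i+1]; the live state is the suffix from i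
-- together with c, so the loop is this structural recursion over (suffix, c).
def solveGo : List Int → Int → Int
  | [], c => c
  | x :: rest, c =>
    if x = 1 then
      match rest with
      | y :: r => if y = 1 then solveGo (0 :: r) (c + 1) else solveGo (y :: r) (c + 1)
      | [] => c + 1
    else solveGo rest c
termination_by l _ => l.length
decreasing_by all_goals (simp; try omega)

def solve (A : List Int) : Int := solveGo A 0

-- ===== PORT B =====
-- inner while loop of Source B: length of the leading run of 1s
def runLen : List Int → Nat
  | [] => 0
  | x :: r => if x = 1 then runLen r + 1 else 0

-- outer while loop of Source B over the remaining suffix: on a 1, take the whole run of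
-- length L, add (L+1)//2, continue after the run; else step by one.
def solveAltGo : List Int → Int → Int
  | [], c => c
  | x :: rest, c =>
    if x = 1 then
      let L : Nat := runLen rest + 1
      solveAltGo (rest.drop (L - 1)) (c + PySem.Int.floordiv ((L : Int) + 1) 2)
    else solveAltGo rest c
termination_by l _ => l.length
decreasing_by all_goals (simp [List.length_drop]; try omega)

def solve_alt (A : List Int) : Int := solveAltGo A 0

-- ===== PRECONDITION & SPEC =====
def Spec_solve (A : List Int) (out : Int) : Prop := out = solve_alt A
instance (A : List Int) (out : Int) : Decidable (Spec_solve A out) := by unfold Spec_solve; infer_instance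

-- ===== CLAIM (what is proved, stated in full; the proofs are below) =====
def Claim_equal_solve : Prop := ∀ (A : List Int), Dom_solve A → Spec_solve A (solve A)

-- ===== LEMMAS AND PROOFS =====

theorem solveGo_nil (c : Int) : solveGo [] c = c := by rw [solveGo]
theorem solveGo_cons_ne (x : Int) (rest : List Int) (c : Int) (h : ¬ x = 1) :
    solveGo (x :: rest) c = solveGo rest c := by rw [solveGo.eq_def]; simp [h]
theorem solveGo_one_nil (c : Int) : solveGo [1] c = c + 1 := by rw [solveGo.eq_def]; norm_num
theorem solveGo_one_one (r : List Int) (c : Int) :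
    solveGo (1 :: 1 :: r) c = solveGo (0 :: r) (c + 1) := by rw [solveGo.eq_def]; simp
theorem solveGo_one_ne (y : Int) (r : List Int) (c : Int) (h : ¬ y = 1) :
    solveGo (1 :: y :: r) c = solveGo (y :: r) (c + 1) := by rw [solveGo.eq_def]; simp [h]

theorem altGo_nil (c : Int) : solveAltGo [] c = c := by rw [solveAltGo]
theorem altGo_one (rest : List Int) (c : Int) :
    solveAltGo (1 :: rest) c =
      solveAltGo (rest.drop (runLen rest)) (c + ((runLen rest : Int) + 2) / 2) := by
  rw [solveAltGo.eq_def]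
  simp
  have h2 : ((runLen rest : Int) + 1 + 1) = (runLen rest : Int) + 2 := by ring
  rw [h2]
theorem altGo_ne (x : Int) (rest : List Int) (c : Int) (h : ¬ x = 1) :
    solveAltGo (x :: rest) c = solveAltGo rest c := by rw [solveAltGo.eq_def]; simp [h]

-- A's behaviour on a run: entering at a 1, it ends up after the run having added ⌈L/2⌉.
theorem solveGo_run : ∀ (n : Nat) (rest : List Int) (c : Int), rest.length ≤ n →
    solveGo (1 :: rest) c =
      solveGo (rest.drop (runLen rest)) (c + ((runLen rest : Int) + 2) / 2) := by
  intro n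
  induction n with
  | zero =>
    intro rest c h
    have : rest = [] := List.eq_nil_of_length_eq_zero (Nat.le_zero.mp h)
    subst this
    rw [solveGo_one_nil]
    simp [runLen, solveGo_nil]
  | succ m ih =>
    intro rest c h
    match rest with
    | [] =>
      rw [solveGo_one_nil]
      simp [runLen, solveGo_nil]
    | y :: r =>
      by_cases hy : y = 1
      · subst hy
        rw [solveGo_one_one, solveGo_cons_ne 0 r (c + 1) (by norm_num)]
        match r with
        | [] =>
          have h1 : runLen [1] = 1 := by simp [runLen]
          rw [solveGo_nil, h1]
          show c + 1 = solveGo [] (c + (((1:Nat):Int) + 2) / 2)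
          rw [solveGo_nil]
          push_cast
          omega
        | z :: r' =>
          by_cases hz : z = 1
          · subst hz
            have hr' : r'.length ≤ m := by simp at h; omega
            rw [ih r' (c + 1) hr']
            simp only [runLen]
            congr 1
            push_cast
            omega
          · simp only [runLen, if_neg hz]
            congr 1
      · simp only [runLen, if_neg hy, List.drop_zero]
        rw [solveGo_one_ne y r c hy]
        congr 1

theorem solveGo_eq_solveAltGo : ∀ (n : Nat) (l : List Int) (c : Int), l.length ≤ n →
    solveGo l c = solveAltGo l c := by
  intro n
  induction n with
  | zero =>
    intro l c h
    have : l = [] := List.eq_nil_of_length_eq_zero (Nat.le_zero.mp h)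
    subst this; rw [solveGo_nil, altGo_nil]
  | succ m ih =>
    intro l c h
    match l with
    | [] => rw [solveGo_nil, altGo_nil]
    | x :: rest =>
      have hrest : rest.length ≤ m := by simp at h; omega
      by_cases hx : x = 1
      · subst hx
        rw [solveGo_run rest.length rest c (Nat.le_refl _), altGo_one]
        exact ih _ _ (by simp [List.length_drop]; omega)
      · rw [solveGo_cons_ne x rest c hx, altGo_ne x rest c hx]
        exact ih rest c hrest

-- ===== VERDICT (by name: the statement is the Claim_ definition above) =====
theorem solve_spec : Claim_equal_solve := by
  intro A _
  unfold Spec_solve solve solve_alt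
  exact solveGo_eq_solveAltGo A.length A 0 (Nat.le_refl _)
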